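-- pv_equiv track=rewrite | github.com/OmarFern/RPL | 4_1_iterando.py | letras_en_palabra
-- ===== SOURCE A (Python) =====
-- def letras_en_palabra(letras, frase):
--       contador=0
--       for i in range(len(letras)):
--            if letras[i] in frase:
--              contador=contador+1
--
--       if contador==len(letras):
--           resultado=True
--       else:
--           resultado=False
--       return resultado
-- ===== SOURCE B (Python) =====
-- def letras_en_palabra(letras, frase):
--     return set(letras) <= set(frase)
-- ===== Notes on version B (the rewrite author's own statement) =====
-- stated objective: simpler
-- what changed: Replaces the index loop with a per-letter counter and the final count-vs-length comparison by a single set-subset test between the character sets of letras and frase.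
import Mathlib
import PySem

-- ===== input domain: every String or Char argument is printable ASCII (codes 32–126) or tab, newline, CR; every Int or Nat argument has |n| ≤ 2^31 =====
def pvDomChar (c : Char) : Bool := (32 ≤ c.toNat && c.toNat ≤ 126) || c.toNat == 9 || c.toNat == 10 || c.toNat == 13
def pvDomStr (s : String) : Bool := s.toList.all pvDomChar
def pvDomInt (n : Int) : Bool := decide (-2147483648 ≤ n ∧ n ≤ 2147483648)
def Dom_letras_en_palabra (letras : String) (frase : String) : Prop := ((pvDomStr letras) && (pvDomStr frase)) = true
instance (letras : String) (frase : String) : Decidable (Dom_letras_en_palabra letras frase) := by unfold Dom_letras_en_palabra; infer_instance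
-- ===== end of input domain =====

-- B replaces A's counting loop by a single subset test on the two character sets (objective: simpler).

-- ===== PORT A =====
-- A counts, for each index i of letras, whether letras[i] occurs in frase, then compares the count to len(letras).
def letras_en_palabra (letras : String) (frase : String) : Bool :=
  let contador : Int :=
    letras.toList.foldl (fun c ch => if frase.toList.contains ch then c + 1 else c) 0
  if contador == (letras.toList.length : Int) then true else false

-- ===== PORT B =====
-- set(letras) <= set(frase)
def letras_en_palabra_alt (letras : String) (frase : String) : Bool :=
  PySem.Set.issubset (PySem.Set.ofList letras.toList) (PySem.Set.ofList frase.toList)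

-- ===== PRECONDITION & SPEC =====
def Spec_letras_en_palabra (letras : String) (frase : String) (out : Bool) : Prop := out = letras_en_palabra_alt letras frase
instance (letras : String) (frase : String) (out : Bool) : Decidable (Spec_letras_en_palabra letras frase out) := by unfold Spec_letras_en_palabra; infer_instance

-- ===== CLAIM (what is proved, stated in full; the proofs are below) =====
def Claim_equal_letras_en_palabra : Prop := ∀ (letras : String) (frase : String), Dom_letras_en_palabra letras frase → Spec_letras_en_palabra letras frase (letras_en_palabra letras frase)

-- ===== LEMMAS AND PROOFS =====

theorem pv_foldl_count {α : Type} (p : α → Bool) (l : List α) (n : Int) :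
    l.foldl (fun c ch => if p ch then c + 1 else c) n = n + (l.countP p : Int) := by
  induction l generalizing n with
  | nil => simp
  | cons x xs ih =>
    simp only [List.foldl_cons, List.countP_cons, ih]
    by_cases h : p x
    · simp [h]; ring
    · simp [h]

-- ===== VERDICT (by name: the statement is the Claim_ definition above) =====
theorem letras_en_palabra_spec : Claim_equal_letras_en_palabra := by
  intro letras frase _
  unfold Spec_letras_en_palabra letras_en_palabra letras_en_palabra_alt
  simp only [pv_foldl_count, zero_add, beq_iff_eq]
  rw [Bool.eq_iff_iff]
  simp only [PySem.Set.issubset_iff, PySem.Set.mem_ofList]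
  constructor
  · intro h
    split at h
    · next heq =>
      have hc : letras.toList.countP (fun ch => frase.toList.contains ch) = letras.toList.length := by
        exact_mod_cast heq
      intro x hx
      have := List.countP_eq_length.mp hc x hx
      simpa using this
    · exact absurd h (by simp)
  · intro h
    have hc : letras.toList.countP (fun ch => frase.toList.contains ch) = letras.toList.length :=
      List.countP_eq_length.mpr (fun x hx => by simpa using h x hx)
    simp [hc]
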